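-- pv_equiv track=rewrite | github.com/MountainGray/advent | 2020/day17/q.py | padGrid
-- ===== SOURCE A (Python) =====
-- def padGrid(points):
--     p2=points.copy()
--     for key, val in points.items():
--         if val==True:
--             for x in (-1, 0, 1):
--                 for y in (-1, 0, 1):
--                     for z in (-1, 0, 1):
--                         if  x != 0 or y!=0 or z!=0:
--                             if (key[0]+x,key[1]+y,key[2]+z) not in points:
--                                 p2[(key[0]+x,key[1]+y,key[2]+z)]=False
--     return p2
-- ===== SOURCE B (Python) =====
-- def padGrid(points):
--     # Recursively consume the list of active cells, threading one growing 'known'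
--     # set (keys of points plus cells already emitted).  Because every active cell
--     # is itself known, the centre offset needs no special test, and the
--     # single membership test replaces both of A's guards.  The result is built by
--     # concatenation, not by mutating a copy.
--     def grow(actives, known):
--         if not actives:
--             return []
--         px, py, pz = actives[0]
--         fresh = []
--         for dx in (-1, 0, 1):
--             for dy in (-1, 0, 1):
--                 for dz in (-1, 0, 1):
--                     c = (px + dx, py + dy, pz + dz)
--                     if c not in known:
--                         known.add(c)
--                         fresh.append(c)
--         return fresh + grow(actives[1:], known)
--
--     actives = [k for k, v in points.items() if v == True]
--     new_cells = grow(actives, set(points))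
--     return dict(list(points.items()) + [(c, False) for c in new_cells])
-- ===== Notes on version B (the rewrite author's own statement) =====
-- stated objective: alternative
-- what changed: B recurses over the list of active cells, threading one growing 'known' set whose single membership test subsumes both A's centre-offset exclusion and A's 'not in points' check, and assembles the result by concatenating the fresh cells onto the original items instead of mutating a dict copy in place.
import Mathlib
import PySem

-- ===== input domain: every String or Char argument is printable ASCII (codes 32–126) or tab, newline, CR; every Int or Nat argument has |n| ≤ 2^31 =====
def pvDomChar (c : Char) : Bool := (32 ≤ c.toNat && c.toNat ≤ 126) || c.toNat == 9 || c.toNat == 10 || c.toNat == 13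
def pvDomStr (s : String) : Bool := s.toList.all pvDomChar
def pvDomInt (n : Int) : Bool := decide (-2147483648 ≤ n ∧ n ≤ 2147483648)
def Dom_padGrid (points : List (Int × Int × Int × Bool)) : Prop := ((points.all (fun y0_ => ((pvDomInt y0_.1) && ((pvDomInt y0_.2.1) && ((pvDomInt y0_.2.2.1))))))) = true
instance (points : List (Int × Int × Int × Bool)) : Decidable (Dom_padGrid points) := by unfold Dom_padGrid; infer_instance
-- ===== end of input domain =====

-- B replaces A's in-place dict padding by a recursion over the active cells that threads one
-- growing 'known' set (subsuming both A's centre-offset test and its 'not in points' test) and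
-- assembles the result by list concatenation; objective: alternative decomposition, same cost.


-- ===== PORT A =====
def padGrid (points : List (Int × Int × Int × Bool)) : List (Int × Int × Int × Bool) :=
  let pts : PySem.Dict (Int × Int × Int) Bool :=
    PySem.Dict.mk (points.map (fun q => ((q.1, q.2.1, q.2.2.1), q.2.2.2)))
  let p2 := pts.items.foldl (fun p2 kv =>
    if kv.2 == true then
      ([-1, 0, 1] : List Int).foldl (fun p2 x =>
        ([-1, 0, 1] : List Int).foldl (fun p2 y =>
          ([-1, 0, 1] : List Int).foldl (fun p2 z =>
            if x != 0 || y != 0 || z != 0 then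
              if !(pts.contains (kv.1.1 + x, kv.1.2.1 + y, kv.1.2.2 + z)) then
                p2.insert (kv.1.1 + x, kv.1.2.1 + y, kv.1.2.2 + z) false
              else p2
            else p2) p2) p2) p2
    else p2) pts
  p2.items.map (fun p => (p.1.1, p.1.2.1, p.1.2.2, p.2))

-- ===== PORT B =====
-- B's helper 'grow': recursion over the active cells, threading one growing 'known' set
def pvGrow : List (Int × Int × Int) → PySem.Set (Int × Int × Int) → List (Int × Int × Int)
  | [], _ => []
  | p :: rest, known =>
      let st := ([-1, 0, 1] : List Int).foldl (fun st dx =>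
        ([-1, 0, 1] : List Int).foldl (fun st dy =>
          ([-1, 0, 1] : List Int).foldl (fun st dz =>
            let c := (p.1 + dx, p.2.1 + dy, p.2.2 + dz)
            if !(PySem.Set.contains st.1 c) then (PySem.Set.add st.1 c, st.2 ++ [c]) else st)
          st) st) (known, ([] : List (Int × Int × Int)))
      st.2 ++ pvGrow rest st.1

def padGrid_alt (points : List (Int × Int × Int × Bool)) : List (Int × Int × Int × Bool) :=
  let pts : PySem.Dict (Int × Int × Int) Bool :=
    PySem.Dict.mk (points.map (fun q => ((q.1, q.2.1, q.2.2.1), q.2.2.2)))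
  let actives := (pts.items.filter (fun kv => kv.2 == true)).map (fun kv => kv.1)
  let newCells := pvGrow actives (PySem.Set.ofList pts.keys)
  (PySem.Dict.ofList (pts.items ++ newCells.map (fun c => (c, false)))).items.map
    (fun p => (p.1.1, p.1.2.1, p.1.2.2, p.2))

-- ===== PRECONDITION & SPEC =====
-- The argument encodes a Python dict, whose keys are necessarily distinct; Pre_ states exactly
-- that, so it excludes no input the Python function can actually receive.
def Pre_padGrid (points : List (Int × Int × Int × Bool)) : Prop :=
  (points.map (fun q => (q.1, q.2.1, q.2.2.1))).Nodup
instance (points : List (Int × Int × Int × Bool)) : Decidable (Pre_padGrid points) := by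
  unfold Pre_padGrid; infer_instance
def pvWitness_padGrid : (List (Int × Int × Int × Bool)) := [(0, 0, 0, true)]
def Spec_padGrid (points : List (Int × Int × Int × Bool)) (out : List (Int × Int × Int × Bool)) : Prop := out = padGrid_alt points
instance (points : List (Int × Int × Int × Bool)) (out : List (Int × Int × Int × Bool)) : Decidable (Spec_padGrid points out) := by unfold Spec_padGrid; infer_instance

-- ===== CLAIM =====
def Claim_equal_padGrid : Prop := ∀ (points : List (Int × Int × Int × Bool)), Dom_padGrid points → Pre_padGrid points → Spec_padGrid points (padGrid points)

-- ===== LEMMAS AND PROOFS =====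

def pvC (p δ : Int × Int × Int) : Int × Int × Int := (p.1 + δ.1, p.2.1 + δ.2.1, p.2.2 + δ.2.2)

def pvStepA (pts : PySem.Dict (Int × Int × Int) Bool) (p : Int × Int × Int)
    (d : PySem.Dict (Int × Int × Int) Bool) (δ : Int × Int × Int) :
    PySem.Dict (Int × Int × Int) Bool :=
  if δ.1 != 0 || δ.2.1 != 0 || δ.2.2 != 0 then
    if !(pts.contains (pvC p δ)) then d.insert (pvC p δ) false else d
  else d

def pvStepB (p : Int × Int × Int)
    (st : PySem.Set (Int × Int × Int) × List (Int × Int × Int)) (δ : Int × Int × Int) :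
    PySem.Set (Int × Int × Int) × List (Int × Int × Int) :=
  if !(PySem.Set.contains st.1 (pvC p δ)) then
    (PySem.Set.add st.1 (pvC p δ), st.2 ++ [pvC p δ])
  else st

def pvDs27 : List (Int × Int × Int) :=
  ([-1, 0, 1] : List Int).flatMap (fun x =>
    ([-1, 0, 1] : List Int).flatMap (fun y =>
      ([-1, 0, 1] : List Int).map (fun z => (x, y, z))))

-- A's nested literal loops on one dict entry are a fold over the 27 offsets
theorem pvFlatA (pts : PySem.Dict (Int × Int × Int) Bool) (p : Int × Int × Int)
    (d : PySem.Dict (Int × Int × Int) Bool) :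
    ([-1, 0, 1] : List Int).foldl (fun p2 x =>
      ([-1, 0, 1] : List Int).foldl (fun p2 y =>
        ([-1, 0, 1] : List Int).foldl (fun p2 z =>
          if x != 0 || y != 0 || z != 0 then
            if !(pts.contains (p.1 + x, p.2.1 + y, p.2.2 + z)) then
              p2.insert (p.1 + x, p.2.1 + y, p.2.2 + z) false
            else p2
          else p2) p2) p2) d
    = pvDs27.foldl (pvStepA pts p) d := by
  simp only [pvDs27, List.foldl_flatMap, List.foldl_map, pvStepA, pvC]

-- B's nested literal loops on one active cell are a fold over the 27 offsets
theorem pvFlatB (p : Int × Int × Int)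
    (st : PySem.Set (Int × Int × Int) × List (Int × Int × Int)) :
    ([-1, 0, 1] : List Int).foldl (fun st dx =>
      ([-1, 0, 1] : List Int).foldl (fun st dy =>
        ([-1, 0, 1] : List Int).foldl (fun st dz =>
          let c := (p.1 + dx, p.2.1 + dy, p.2.2 + dz)
          if !(PySem.Set.contains st.1 c) then (PySem.Set.add st.1 c, st.2 ++ [c]) else st)
        st) st) st
    = pvDs27.foldl (pvStepB p) st := by
  simp only [pvDs27, List.foldl_flatMap, List.foldl_map, pvStepB, pvC]

-- the fresh-list accumulator of B's fold is a pure suffix accumulator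
theorem pvAccB (p : Int × Int × Int) (ds : List (Int × Int × Int)) :
    ∀ (known : PySem.Set (Int × Int × Int)) (fresh : List (Int × Int × Int)),
    ds.foldl (pvStepB p) (known, fresh)
    = ((ds.foldl (pvStepB p) (known, [])).1, fresh ++ (ds.foldl (pvStepB p) (known, [])).2) := by
  induction ds with
  | nil => intro known fresh; simp
  | cons δ ds ih =>
    intro known fresh
    simp only [List.foldl_cons, pvStepB]
    cases h : PySem.Set.contains known (pvC p δ)
    · simp only [Bool.not_false, if_true]
      rw [ih _ (fresh ++ [pvC p δ]), ih _ ([] ++ [pvC p δ])]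
      simp
    · simp only [Bool.not_true]
      exact ih known fresh

-- inserting a key all of whose occurrences already carry the inserted value changes nothing
theorem pvInsert_eq_self (d : PySem.Dict (Int × Int × Int) Bool) (c : Int × Int × Int)
    (h1 : d.contains c = true) (h2 : ∀ p ∈ d.items, p.1 = c → p.2 = false) :
    d.insert c false = d := by
  apply PySem.Dict.ext
  rw [PySem.Dict.items_insert_of_contains d false h1]
  have : ∀ p ∈ d.items, (if (p.1 == c) = true then (c, false) else p) = p := by
    intro p hp
    by_cases hc : p.1 = c
    · have hv : p.2 = false := h2 p hp hc
      simp only [hc, BEq.rfl, if_true]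
      exact (Prod.ext hc hv).symm
    · simp [hc]
  calc List.map (fun p => if (p.1 == c) = true then (c, false) else p) d.items
      = List.map id d.items := List.map_congr_left this
    _ = d.items := List.map_id d.items

-- the invariant tying A's working dict to B's known set
def pvInv (pts d : PySem.Dict (Int × Int × Int) Bool) (known : PySem.Set (Int × Int × Int)) : Prop :=
  (∀ c, c ∈ known ↔ d.contains c = true) ∧
  (∀ q ∈ d.items, pts.contains q.1 = false → q.2 = false) ∧
  (∀ c, pts.contains c = true → d.contains c = true) ∧
  d.keys.Nodup

-- one active cell: A's 27 conditional inserts append exactly B's fresh cells, preserving pvInv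
theorem pvInner (pts : PySem.Dict (Int × Int × Int) Bool) (p : Int × Int × Int)
    (hp : pts.contains p = true) (ds : List (Int × Int × Int)) :
    ∀ (d : PySem.Dict (Int × Int × Int) Bool) (known : PySem.Set (Int × Int × Int)),
    pvInv pts d known →
    (ds.foldl (pvStepA pts p) d).items
      = d.items ++ ((ds.foldl (pvStepB p) (known, [])).2).map (fun c => (c, false))
    ∧ pvInv pts (ds.foldl (pvStepA pts p) d) ((ds.foldl (pvStepB p) (known, [])).1) := by
  induction ds with
  | nil => intro d known hinv; exact ⟨by simp, hinv⟩
  | cons δ ds ih =>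
    intro d known hinv
    obtain ⟨h1, h2, h3, h4⟩ := hinv
    simp only [List.foldl_cons]
    by_cases hA : (δ.1 != 0 || δ.2.1 != 0 || δ.2.2 != 0) = true
    · -- a real neighbour offset
      by_cases hc : pts.contains (pvC p δ) = true
      · -- already a key of points: both sides skip
        have hkm : pvC p δ ∈ known := (h1 _).2 (h3 _ hc)
        have eA : pvStepA pts p d δ = d := by simp [pvStepA, hA, hc]
        have eB : pvStepB p (known, []) δ = (known, []) := by simp [pvStepB, hkm]
        rw [eA, eB]; exact ih d known ⟨h1, h2, h3, h4⟩
      · by_cases hd : d.contains (pvC p δ) = true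
        · -- already emitted earlier: A's re-insert is a no-op, B skips
          have hkm : pvC p δ ∈ known := (h1 _).2 hd
          have eA : pvStepA pts p d δ = d := by
            simp only [pvStepA, hA, if_true, eq_false_of_ne_true hc, Bool.not_false]
            exact pvInsert_eq_self d (pvC p δ) hd
              (fun q hq hqc => h2 q hq (by rw [hqc]; exact eq_false_of_ne_true hc))
          have eB : pvStepB p (known, []) δ = (known, []) := by simp [pvStepB, hkm]
          rw [eA, eB]; exact ih d known ⟨h1, h2, h3, h4⟩
        · -- fresh cell: A appends (c, false), B emits c and learns it
          have hdf : d.contains (pvC p δ) = false := eq_false_of_ne_true hd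
          have hkm : pvC p δ ∉ known := fun hm => hd ((h1 _).1 hm)
          have eA : pvStepA pts p d δ = d.insert (pvC p δ) false := by
            simp [pvStepA, hA, eq_false_of_ne_true hc]
          have eB : pvStepB p (known, []) δ = (PySem.Set.add known (pvC p δ), [pvC p δ]) := by
            simp [pvStepB, hkm]
          rw [eA, eB]
          have hinv' : pvInv pts (d.insert (pvC p δ) false) (PySem.Set.add known (pvC p δ)) := by
            refine ⟨?_, ?_, ?_, ?_⟩
            · intro c
              rw [PySem.Set.mem_add, PySem.Dict.contains_insert]
              constructor
              · rintro (hm | rfl)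
                · simp [(h1 c).1 hm]
                · simp
              · intro hb
                rcases Bool.or_eq_true_iff.1 hb with hb | hb
                · exact Or.inr (by simpa using hb)
                · exact Or.inl ((h1 c).2 hb)
            · intro q hq hqp
              rcases (PySem.Dict.mem_items_insert _ _ _ _).1 hq with rfl | ⟨hm, _⟩
              · rfl
              · exact h2 q hm hqp
            · intro c hcp
              rw [PySem.Dict.contains_insert]
              simp [h3 c hcp]
            · rw [PySem.Dict.keys_insert_of_not_contains _ _ hdf]
              have hnm : pvC p δ ∉ d.keys :=
                fun hm => hd ((PySem.Dict.contains_iff_mem_keys _ _).2 hm)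
              rw [List.nodup_append]
              refine ⟨h4, List.nodup_singleton _, fun x hx y hy hxy => ?_⟩
              rw [List.mem_singleton] at hy
              exact hnm (hy ▸ hxy ▸ hx)
          obtain ⟨hItems, hInv⟩ := ih (d.insert (pvC p δ) false) (PySem.Set.add known (pvC p δ)) hinv'
          rw [pvAccB p ds _ [pvC p δ]]
          constructor
          · rw [hItems, PySem.Dict.items_insert_of_not_contains d false hdf]
            simp
          · exact hInv
    · -- the centre offset itself: A skips by its test, B skips because p is known
      obtain ⟨⟨hz1, hz2⟩, hz3⟩ : (δ.1 = 0 ∧ δ.2.1 = 0) ∧ δ.2.2 = 0 := by simpa using hA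
      have hcp : pvC p δ = p := by simp [pvC, hz1, hz2, hz3]
      have hkm : pvC p δ ∈ known := by rw [hcp]; exact (h1 _).2 (h3 _ hp)
      have eA : pvStepA pts p d δ = d := by simp [pvStepA, hz1, hz2, hz3]
      have eB : pvStepB p (known, []) δ = (known, []) := by simp [pvStepB, hkm]
      rw [eA, eB]; exact ih d known ⟨h1, h2, h3, h4⟩

-- B's recursion unrolled one active cell, via the flattening of its nested loops
theorem pvGrow_cons (p : Int × Int × Int) (rest : List (Int × Int × Int))
    (known : PySem.Set (Int × Int × Int)) :
    pvGrow (p :: rest) known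
    = (pvDs27.foldl (pvStepB p) (known, [])).2
      ++ pvGrow rest (pvDs27.foldl (pvStepB p) (known, [])).1 := by
  simp only [pvGrow]
  rw [pvFlatB]

-- whole loop: A's fold over the dict items appends exactly B's grown cells
theorem pvOuter (pts : PySem.Dict (Int × Int × Int) Bool) (its : List ((Int × Int × Int) × Bool)) :
    ∀ (d : PySem.Dict (Int × Int × Int) Bool) (known : PySem.Set (Int × Int × Int)),
    pvInv pts d known → (∀ kv ∈ its, pts.contains kv.1 = true) →
    (its.foldl (fun d kv => if kv.2 == true then pvDs27.foldl (pvStepA pts kv.1) d else d) d).items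
      = d.items ++ (pvGrow ((its.filter (fun kv => kv.2 == true)).map (fun kv => kv.1)) known).map
          (fun c => (c, false))
    ∧ ∃ known', pvInv pts
        (its.foldl (fun d kv => if kv.2 == true then pvDs27.foldl (pvStepA pts kv.1) d else d) d)
        known' := by
  induction its with
  | nil =>
    intro d known hinv _
    refine ⟨?_, known, hinv⟩
    show d.items = d.items ++ (pvGrow [] known).map (fun c => (c, false))
    simp [pvGrow]
  | cons kv its ih =>
    intro d known hinv hmem
    have hmem' := fun q hq => hmem q (List.mem_cons_of_mem _ hq)
    cases hv : kv.2
    · simpa [hv] using ih d known hinv hmem'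
    · have hp : pts.contains kv.1 = true := hmem kv List.mem_cons_self
      obtain ⟨hItems, hInv⟩ := pvInner pts kv.1 hp pvDs27 d known hinv
      obtain ⟨hItems', hInv'⟩ := ih _ _ hInv hmem'
      rw [List.foldl_cons, List.filter_cons]
      simp only [hv, BEq.rfl, if_true, List.map_cons, pvGrow_cons]
      exact ⟨by rw [hItems', hItems]; simp, hInv'⟩

-- the whole function, at dict level, for any dict with distinct keys
theorem pvMain (pts : PySem.Dict (Int × Int × Int) Bool) (hnodup : pts.keys.Nodup) :
    pts.items.foldl (fun p2 kv =>
      if kv.2 == true then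
        ([-1, 0, 1] : List Int).foldl (fun p2 x =>
          ([-1, 0, 1] : List Int).foldl (fun p2 y =>
            ([-1, 0, 1] : List Int).foldl (fun p2 z =>
              if x != 0 || y != 0 || z != 0 then
                if !(pts.contains (kv.1.1 + x, kv.1.2.1 + y, kv.1.2.2 + z)) then
                  p2.insert (kv.1.1 + x, kv.1.2.1 + y, kv.1.2.2 + z) false
                else p2
              else p2) p2) p2) p2
      else p2) pts
    = PySem.Dict.ofList (pts.items ++
        (pvGrow ((pts.items.filter (fun kv => kv.2 == true)).map (fun kv => kv.1))
          (PySem.Set.ofList pts.keys)).map (fun c => (c, false))) := by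
  have hfun : (fun (p2 : PySem.Dict (Int × Int × Int) Bool) (kv : (Int × Int × Int) × Bool) =>
      if kv.2 == true then
        ([-1, 0, 1] : List Int).foldl (fun p2 x =>
          ([-1, 0, 1] : List Int).foldl (fun p2 y =>
            ([-1, 0, 1] : List Int).foldl (fun p2 z =>
              if x != 0 || y != 0 || z != 0 then
                if !(pts.contains (kv.1.1 + x, kv.1.2.1 + y, kv.1.2.2 + z)) then
                  p2.insert (kv.1.1 + x, kv.1.2.1 + y, kv.1.2.2 + z) false
                else p2
              else p2) p2) p2) p2
      else p2)
      = (fun d kv => if kv.2 == true then pvDs27.foldl (pvStepA pts kv.1) d else d) := by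
    funext d kv
    cases kv.2
    · simp
    · simp only [BEq.rfl, if_true]
      exact pvFlatA pts kv.1 d
  have hinv0 : pvInv pts pts (PySem.Set.ofList pts.keys) := by
    refine ⟨?_, ?_, fun c h => h, hnodup⟩
    · intro c
      rw [PySem.Set.mem_ofList, PySem.Dict.contains_iff_mem_keys]
    · intro q hq hqf
      have : pts.contains q.1 = true :=
        (PySem.Dict.contains_iff_mem_keys _ _).2 (PySem.Dict.mem_keys_of_mem_items _ hq)
      rw [this] at hqf; cases hqf
  have hmem : ∀ kv ∈ pts.items, pts.contains kv.1 = true := fun kv hkv =>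
    (PySem.Dict.contains_iff_mem_keys _ _).2 (PySem.Dict.mem_keys_of_mem_items _ hkv)
  obtain ⟨hItems, known', hInv⟩ :=
    pvOuter pts pts.items pts (PySem.Set.ofList pts.keys) hinv0 hmem
  rw [hfun]
  apply PySem.Dict.ext
  rw [hItems]
  have hLnodup : ((pts.items ++
      (pvGrow ((pts.items.filter (fun kv => kv.2 == true)).map (fun kv => kv.1))
        (PySem.Set.ofList pts.keys)).map (fun c => (c, false))).map Prod.fst).Nodup := by
    have hkeys : (pts.items.foldl
        (fun d kv => if kv.2 == true then pvDs27.foldl (pvStepA pts kv.1) d else d) pts).keys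
        = (pts.items ++
            (pvGrow ((pts.items.filter (fun kv => kv.2 == true)).map (fun kv => kv.1))
              (PySem.Set.ofList pts.keys)).map (fun c => (c, false))).map Prod.fst := by
      show (pts.items.foldl
        (fun d kv => if kv.2 == true then pvDs27.foldl (pvStepA pts kv.1) d else d) pts).items.map
          Prod.fst = _
      rw [hItems]
    rw [← hkeys]
    exact hInv.2.2.2
  have hOf : (PySem.Dict.ofList (pts.items ++
      (pvGrow ((pts.items.filter (fun kv => kv.2 == true)).map (fun kv => kv.1))
        (PySem.Set.ofList pts.keys)).map (fun c => (c, false)))).items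
      = pts.items ++
        (pvGrow ((pts.items.filter (fun kv => kv.2 == true)).map (fun kv => kv.1))
          (PySem.Set.ofList pts.keys)).map (fun c => (c, false)) := by
    have h2 := PySem.Dict.items_foldl_insert_fresh (pts.items ++
        (pvGrow ((pts.items.filter (fun kv => kv.2 == true)).map (fun kv => kv.1))
          (PySem.Set.ofList pts.keys)).map (fun c => (c, false)))
        Prod.fst Prod.snd PySem.Dict.empty (fun a _ => rfl) hLnodup
    calc (PySem.Dict.ofList (pts.items ++
          (pvGrow ((pts.items.filter (fun kv => kv.2 == true)).map (fun kv => kv.1))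
            (PySem.Set.ofList pts.keys)).map (fun c => (c, false)))).items
        = ((pts.items ++
            (pvGrow ((pts.items.filter (fun kv => kv.2 == true)).map (fun kv => kv.1))
              (PySem.Set.ofList pts.keys)).map (fun c => (c, false))).foldl
            (fun d a => d.insert a.1 a.2) PySem.Dict.empty).items := rfl
      _ = _ := h2
      _ = _ := by simp [PySem.Dict.empty, Function.comp]
  rw [hOf]

-- ===== VERDICT =====
theorem padGrid_spec : Claim_equal_padGrid := by
  intro points _ hpre
  show padGrid points = padGrid_alt points
  have hnodup : (PySem.Dict.mk
      (points.map (fun q => ((q.1, q.2.1, q.2.2.1), q.2.2.2)))).keys.Nodup := by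
    show ((points.map (fun q => ((q.1, q.2.1, q.2.2.1), q.2.2.2))).map Prod.fst).Nodup
    rw [List.map_map]
    exact hpre
  exact congrArg (fun d => d.items.map (fun p => (p.1.1, p.1.2.1, p.1.2.2, p.2)))
    (pvMain (PySem.Dict.mk (points.map (fun q => ((q.1, q.2.1, q.2.2.1), q.2.2.2)))) hnodup)
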